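-- pv_equiv track=rewrite | github.com/Janek21/Bioinfo_share_2Y_2T | Bruno/ADS/programs/Sluggish_Knapsack.py | finding_sum
-- ===== SOURCE A (Python) =====
-- def finding_sum(weights, start, i, lista, answer, limw, suma):
--     if start == len(weights):
--         return answer
--     else:
--         if i < len(weights):
--
--             if suma + weights[i] <= limw:
--                 lista.append(i)
--                 suma += weights[i]
--                 i += 1
--                 return finding_sum(weights, start, i, lista, answer, limw, suma)
--             else:
--                 i += 1
--                 return finding_sum(weights, start, i, lista, answer, limw, suma)
--         else:
--             answer.append(lista)
--             suma = 0
--             lista = []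
--             start += 1
--             i = start
--             return finding_sum(weights, start, i, lista, answer, limw, suma)
-- ===== SOURCE B (Python) =====
-- def finding_sum(weights, start, i, lista, answer, limw, suma):
--     # Nested-loop decomposition: finish the current greedy segment, then one
--     # fresh greedy scan per later start.  Mutates the caller's lista/answer
--     # in place exactly as the original does.
--     n = len(weights)
--     if start == n:
--         return answer
--     for j in range(i, n):
--         if suma + weights[j] <= limw:
--             lista.append(j)
--             suma += weights[j]
--     answer.append(lista)
--     for s in range(start + 1, n):
--         seg, tot = [], 0
--         for j in range(s, n):
--             if tot + weights[j] <= limw: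
--                 seg.append(j)
--                 tot += weights[j]
--         answer.append(seg)
--     return answer
-- ===== Notes on version B (the rewrite author's own statement) =====
-- stated objective: simpler
-- what changed: Replaces A's single self-recursive state machine (one call per item and per segment reset, threading start/i/lista/suma through every call) by a direct nested-loop decomposition: finish the current greedy segment with one for-loop, then one fresh greedy scan per later starting position; same in-place appends to the caller's lista/answer.
import Mathlib
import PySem

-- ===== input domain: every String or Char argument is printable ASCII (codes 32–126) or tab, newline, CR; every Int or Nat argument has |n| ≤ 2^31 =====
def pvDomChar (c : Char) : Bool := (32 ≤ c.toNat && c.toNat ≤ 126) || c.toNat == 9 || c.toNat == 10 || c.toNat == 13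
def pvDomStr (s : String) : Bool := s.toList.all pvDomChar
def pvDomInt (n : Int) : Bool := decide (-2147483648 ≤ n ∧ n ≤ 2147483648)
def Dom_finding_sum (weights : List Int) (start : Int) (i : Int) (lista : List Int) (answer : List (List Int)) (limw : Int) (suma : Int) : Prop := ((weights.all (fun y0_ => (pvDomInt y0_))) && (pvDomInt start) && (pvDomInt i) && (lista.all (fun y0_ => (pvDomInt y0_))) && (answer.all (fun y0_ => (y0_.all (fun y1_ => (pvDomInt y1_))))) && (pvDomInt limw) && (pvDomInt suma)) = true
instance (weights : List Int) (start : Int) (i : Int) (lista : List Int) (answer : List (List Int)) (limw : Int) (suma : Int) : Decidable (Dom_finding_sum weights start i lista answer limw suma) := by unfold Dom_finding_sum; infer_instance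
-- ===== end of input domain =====

-- B replaces A's single recursive state machine by a plain nested-loop decomposition
-- (finish the current greedy segment, then one fresh greedy scan per later start);
-- B performs the same in-place appends to the caller's lista/answer as A.
-- Equivalence proved about the RETURN value on Pre_ (exactly where A terminates without
-- an exception: outside it A's recursion never ends or hits an IndexError).

-- ===== PORT A =====
-- A is recursive and does not terminate when start > len(weights); the port uses fuel
-- (fuelA, an exact step bound under Pre_) purely to make the same computation total.
def findA (fuel : Nat) (weights : List Int) (start i : Int) (lista : List Int)
    (answer : List (List Int)) (limw suma : Int) : List (List Int) :=
  match fuel with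
  | 0 => answer  -- unreachable with fuel = fuelA under Pre_
  | Nat.succ f =>
    if start = (weights.length : Int) then answer
    else if i < (weights.length : Int) then
      match PySem.List.pyGet? weights i with
      | none => answer  -- Python IndexError; excluded by Pre_
      | some w =>
        if suma + w ≤ limw then findA f weights start (i + 1) (lista ++ [i]) answer limw (suma + w)
        else findA f weights start (i + 1) lista answer limw suma
    else findA f weights (start + 1) (start + 1) [] (answer ++ [lista]) limw 0

def fuelA (weights : List Int) (start i : Int) : Nat :=
  ((weights.length : Int) - start).toNat * (((weights.length : Int) - start).toNat + 1)
    + ((weights.length : Int) - i).toNat + 1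

def finding_sum (weights : List Int) (start : Int) (i : Int) (lista : List Int) (answer : List (List Int)) (limw : Int) (suma : Int) : List (List Int) :=
  findA (fuelA weights start i) weights start i lista answer limw suma

-- ===== PORT B =====
-- greedy fill over the index list js, continuing state (lista, suma); one Python for-loop
def fillFrom (weights : List Int) (limw : Int) (js : List Int) (lista : List Int) (suma : Int) :
    List Int × Int :=
  js.foldl (fun st j =>
    match PySem.List.pyGet? weights j with
    | none => st  -- Python IndexError; excluded by Pre_
    | some w => if st.2 + w ≤ limw then (st.1 ++ [j], st.2 + w) else st) (lista, suma)

def finding_sum_alt (weights : List Int) (start : Int) (i : Int) (lista : List Int) (answer : List (List Int)) (limw : Int) (suma : Int) : List (List Int) :=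
  if start = (weights.length : Int) then answer
  else
    (PySem.List.pyRange (start + 1) (weights.length : Int) 1).foldl
      (fun acc s => acc ++ [(fillFrom weights limw (PySem.List.pyRange s (weights.length : Int) 1) [] 0).1])
      (answer ++ [(fillFrom weights limw (PySem.List.pyRange i (weights.length : Int) 1) lista suma).1])

-- ===== PRECONDITION & SPEC =====
-- Pre_ holds exactly where Python A returns: start ≤ len (otherwise the recursion never
-- terminates, RecursionError), and no visited index is below -len (otherwise IndexError).
def Pre_finding_sum (weights : List Int) (start : Int) (i : Int) (lista : List Int) (answer : List (List Int)) (limw : Int) (suma : Int) : Prop :=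
  start ≤ (weights.length : Int) ∧
  (start < (weights.length : Int) →
    (i < (weights.length : Int) → -(weights.length : Int) ≤ i) ∧
    (start + 1 < (weights.length : Int) → -(weights.length : Int) ≤ start + 1))
instance (weights : List Int) (start : Int) (i : Int) (lista : List Int) (answer : List (List Int)) (limw : Int) (suma : Int) : Decidable (Pre_finding_sum weights start i lista answer limw suma) := by unfold Pre_finding_sum; infer_instance

def pvWitness_finding_sum : List Int × Int × Int × List Int × List (List Int) × Int × Int :=
  ([2, 3, 1], 0, 0, [], [], 4, 0)

def Spec_finding_sum (weights : List Int) (start : Int) (i : Int) (lista : List Int) (answer : List (List Int)) (limw : Int) (suma : Int) (out : List (List Int)) : Prop := out = finding_sum_alt weights start i lista answer limw suma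
instance (weights : List Int) (start : Int) (i : Int) (lista : List Int) (answer : List (List Int)) (limw : Int) (suma : Int) (out : List (List Int)) : Decidable (Spec_finding_sum weights start i lista answer limw suma out) := by unfold Spec_finding_sum; infer_instance

-- ===== CLAIM (what is proved, stated in full; the proofs are below) =====
def Claim_equal_finding_sum : Prop := ∀ (weights : List Int) (start : Int) (i : Int) (lista : List Int) (answer : List (List Int)) (limw : Int) (suma : Int), Dom_finding_sum weights start i lista answer limw suma → Pre_finding_sum weights start i lista answer limw suma → Spec_finding_sum weights start i lista answer limw suma (finding_sum weights start i lista answer limw suma)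

-- ===== LEMMAS AND PROOFS =====

lemma fuel_reset (a f : Nat) (h1 : 1 ≤ a) (h2 : a * (a + 1) + 1 ≤ f + 1) :
    (a - 1) * ((a - 1) + 1) + (a - 1) + 1 ≤ f := by
  obtain ⟨b, rfl⟩ : ∃ b, a = b + 1 := ⟨a - 1, by omega⟩
  simp only [Nat.add_sub_cancel]
  calc b * (b + 1) + b + 1 = (b + 1) * (b + 1) := by ring
    _ ≤ (b + 1) * (b + 1 + 1) := Nat.mul_le_mul_left _ (by omega)
    _ ≤ f := by omega

lemma findA_eq (weights : List Int) (limw : Int) :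
    ∀ (fuel : Nat) (start i : Int) (lista : List Int) (answer : List (List Int)) (suma : Int),
    start ≤ (weights.length : Int) →
    (start < (weights.length : Int) →
      (i < (weights.length : Int) → -(weights.length : Int) ≤ i) ∧
      (start + 1 < (weights.length : Int) → -(weights.length : Int) ≤ start + 1)) →
    fuelA weights start i ≤ fuel →
    findA fuel weights start i lista answer limw suma =
      if start = (weights.length : Int) then answer
      else
        (PySem.List.pyRange (start + 1) (weights.length : Int) 1).foldl
          (fun acc s => acc ++ [(fillFrom weights limw (PySem.List.pyRange s (weights.length : Int) 1) [] 0).1])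
          (answer ++ [(fillFrom weights limw (PySem.List.pyRange i (weights.length : Int) 1) lista suma).1]) := by
  intro fuel
  induction fuel with
  | zero => intro start i lista answer suma _ _ hf; simp [fuelA] at hf
  | succ f ih =>
    intro start i lista answer suma hle hside hf
    by_cases hs : start = (weights.length : Int)
    · simp [findA, hs]
    · have hslt : start < (weights.length : Int) := lt_of_le_of_ne hle hs
      rw [if_neg hs]
      by_cases hi : i < (weights.length : Int)
      · -- item step
        have hineg : -(weights.length : Int) ≤ i := (hside hslt).1 hi
        have hin : PySem.Raise.InRange weights.length i := by
          constructor <;> omega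
        obtain ⟨w, hw⟩ : ∃ w, PySem.List.pyGet? weights i = some w := by
          rcases h : PySem.List.pyGet? weights i with _ | w
          · rw [PySem.List.pyGet?_eq_none_iff] at h; exact absurd hin h
          · exact ⟨w, rfl⟩
        have hcons : PySem.List.pyRange i (weights.length : Int) 1
            = i :: PySem.List.pyRange (i + 1) (weights.length : Int) 1 :=
          PySem.List.pyRange_one_cons hi
        have hfuel' : fuelA weights start (i + 1) ≤ f := by
          simp only [fuelA] at hf ⊢; omega
        have hside' : start < (weights.length : Int) →
            (i + 1 < (weights.length : Int) → -(weights.length : Int) ≤ i + 1) ∧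
            (start + 1 < (weights.length : Int) → -(weights.length : Int) ≤ start + 1) := by
          intro h'; exact ⟨fun _ => by omega, (hside h').2⟩
        simp only [findA, hw, if_neg hs, if_pos hi]
        by_cases hlim : suma + w ≤ limw
        · rw [if_pos hlim, ih start (i + 1) (lista ++ [i]) answer (suma + w) hle hside' hfuel',
            if_neg hs, hcons]
          simp [fillFrom, hw, hlim]
        · rw [if_neg hlim, ih start (i + 1) lista answer suma hle hside' hfuel', if_neg hs, hcons]
          simp [fillFrom, hw, hlim]
      · -- reset step
        have hnil : PySem.List.pyRange i (weights.length : Int) 1 = [] :=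
          PySem.List.pyRange_one_eq_nil (by omega)
        have hfuel' : fuelA weights (start + 1) (start + 1) ≤ f := by
          simp only [fuelA] at hf ⊢
          have h1 : ((weights.length : Int) - i).toNat = 0 := by omega
          have h2 : ((weights.length : Int) - (start + 1)).toNat
              = ((weights.length : Int) - start).toNat - 1 := by omega
          rw [h1] at hf
          rw [h2]
          exact fuel_reset _ f (by omega) (by omega)
        have hside' : start + 1 < (weights.length : Int) →
            (start + 1 < (weights.length : Int) → -(weights.length : Int) ≤ start + 1) ∧
            (start + 1 + 1 < (weights.length : Int) → -(weights.length : Int) ≤ start + 1 + 1) := by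
          intro h'
          exact ⟨fun _ => (hside hslt).2 h', fun _ => by have := (hside hslt).2 h'; omega⟩
        simp only [findA, if_neg hs, if_neg hi]
        rw [ih (start + 1) (start + 1) [] (answer ++ [lista]) 0 (by omega) hside' hfuel']
        rw [hnil]
        simp only [fillFrom, List.foldl_nil]
        by_cases hs1 : start + 1 = (weights.length : Int)
        · rw [if_pos hs1, hs1, PySem.List.pyRange_one_eq_nil (le_refl _), List.foldl_nil]
        · have hs1lt : start + 1 < (weights.length : Int) := by omega
          rw [if_neg hs1]
          simp only [PySem.List.pyRange_one_cons hs1lt, List.foldl_cons]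

-- ===== VERDICT (by name: the statement is the Claim_ definition above) =====
theorem finding_sum_spec : Claim_equal_finding_sum := by
  intro weights start i lista answer limw suma _ hpre
  unfold Spec_finding_sum finding_sum finding_sum_alt
  exact findA_eq weights limw (fuelA weights start i) start i lista answer suma
    hpre.1 hpre.2 (le_refl _)
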